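-- pv_equiv track=rewrite | github.com/Joonsun-Hwang/coding-test-study-lamda | week6/recommend_new_id/junekyu.py | solution
-- ===== SOURCE A (Python) =====
-- def solution(new_id):
--     # 1.
--     new_id = new_id.lower()
--     # 2. 3.
--     can_use_list = [chr(i) for i in range(ord('a'), ord('z')+1)]
--     can_use_list.append('-')
--     can_use_list.append('_')
--     can_use_list.append('.')
--     n_list = [str(i) for i in range(10)]
--     can_use_list.extend(n_list)
--
--     temp_new_id = ""
--     continuity_flag = False
--     for c in new_id:
--         if c in can_use_list:
--             if c == '.' and continuity_flag == False:
--                 continuity_flag = True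
--                 temp_new_id += c
--             elif c == '.' and continuity_flag:
--                 continue
--             else:
--                 continuity_flag = False
--                 temp_new_id += c
--     new_id = temp_new_id
--
--     # 4.
--     if new_id:
--         if new_id[0] == '.' and new_id:
--             new_id = new_id[1:]
--     if new_id:
--         if new_id[-1] == '.':
--             new_id = new_id[:-1]
--
--     # 5.
--     if len(new_id) == 0:
--         new_id = 'a'
--
--     # 6.
--     new_id = new_id[:15]
--
--     # 7.
--     while len(new_id) <= 2:
--         new_id += new_id[-1]
--
--     # do 4. again
--     if new_id:
--         if new_id[0] == '.' and new_id:
--             new_id = new_id[1:]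
--     if new_id:
--         if new_id[-1] == '.':
--             new_id = new_id[:-1]
--
--     answer = new_id
--     return answer
-- ===== SOURCE B (Python) =====
-- def solution(new_id):
--     allowed = "abcdefghijklmnopqrstuvwxyz0123456789-_."
--     filtered = ''.join(c for c in new_id.lower() if c in allowed)
--     s = '.'.join(part for part in filtered.split('.') if part)
--     if not s:
--         s = 'a'
--     s = s[:15]
--     if s.endswith('.'):
--         s = s[:-1]
--     if len(s) < 3:
--         s = s + s[-1] * (3 - len(s))
--     return s
-- ===== Notes on version B (the rewrite author's own statement) =====
-- stated objective: idiomatic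
-- what changed: Replaces A's stateful single-pass loop (continuity flag, per-character string concatenation, conditional leading/trailing dot strips, a while-loop pad) by a filter comprehension, a split on the dot character with a join of the nonempty parts (which collapses dot runs and strips boundary dots in one step), one trailing-dot check after truncation, and an arithmetic pad.
import Mathlib
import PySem

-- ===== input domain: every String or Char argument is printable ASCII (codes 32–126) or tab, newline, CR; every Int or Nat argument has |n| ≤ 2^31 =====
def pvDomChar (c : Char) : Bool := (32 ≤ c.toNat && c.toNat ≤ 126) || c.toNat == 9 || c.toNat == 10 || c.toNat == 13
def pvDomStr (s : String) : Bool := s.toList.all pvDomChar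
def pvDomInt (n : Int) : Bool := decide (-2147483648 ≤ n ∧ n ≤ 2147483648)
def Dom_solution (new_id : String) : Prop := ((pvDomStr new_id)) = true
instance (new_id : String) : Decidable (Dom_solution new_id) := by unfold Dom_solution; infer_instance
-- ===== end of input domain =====

-- B replaces A's stateful flagged scan and repeated dot-strips by filter + split('.')/join + arithmetic pad (idiomatic, same cost).

-- ===== PORT A =====
-- A's characters are 1-char Python strings; they are modelled as List Char singletons.
-- can_use_list: [chr(i) for i in range(ord('a'), ord('z')+1)] + ['-','_','.'] + [str(i) for i in range(10)]
def canUseList : List (List Char) :=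
  let l := (PySem.List.pyRange 97 123 1).map (fun i => [Char.ofNat i.toNat])
  let l := l ++ [['-']]
  let l := l ++ [['_']]
  let l := l ++ [['.']]
  let nList := (PySem.List.pyRange 0 10 1).map (fun i => PySem.Int.toChars i)
  l ++ nList

-- the body of A's for-loop over (temp_new_id, continuity_flag)
def stepA (st : List Char × Bool) (c : Char) : List Char × Bool :=
  if [c] ∈ canUseList then
    if c = '.' ∧ st.2 = false then (st.1 ++ [c], true)
    else if c = '.' ∧ st.2 = true then st
    else (st.1 ++ [c], false)
  else st

-- `while len(new_id) <= 2: new_id += new_id[-1]`; the `none` branch is where Python's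
-- new_id[-1] would raise IndexError (unreachable in solution: the list is nonempty there)
def padA (l : List Char) : List Char :=
  if _h : l.length ≤ 2 then
    match PySem.List.pyGet? l (-1) with
    | some c => padA (l ++ [c])
    | none => l
  else l
termination_by 3 - l.length
decreasing_by simp [List.length_append]; omega

def solution (new_id : String) : String :=
  let s := (PySem.Str.lower new_id).toList
  let t := (s.foldl stepA ([], false)).1
  -- 4.
  let t := if t ≠ [] then (if PySem.List.pyGet? t 0 = some '.' ∧ t ≠ [] then PySem.List.slice t (some 1) none else t) else t
  let t := if t ≠ [] then (if PySem.List.pyGet? t (-1) = some '.' then PySem.List.slice t none (some (-1)) else t) else t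
  -- 5.
  let t := if t.length = 0 then ['a'] else t
  -- 6.
  let t := PySem.List.slice t none (some 15)
  -- 7.
  let t := padA t
  -- do 4. again
  let t := if t ≠ [] then (if PySem.List.pyGet? t 0 = some '.' ∧ t ≠ [] then PySem.List.slice t (some 1) none else t) else t
  let t := if t ≠ [] then (if PySem.List.pyGet? t (-1) = some '.' then PySem.List.slice t none (some (-1)) else t) else t
  String.ofList t

-- ===== PORT B =====
def allowedB : List Char := "abcdefghijklmnopqrstuvwxyz0123456789-_.".toList

def solution_alt (new_id : String) : String :=
  let filtered := (PySem.Chars.lower new_id.toList).filter (fun c => c ∈ allowedB)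
  let s := PySem.Chars.join ['.'] ((PySem.Chars.splitOn filtered ['.']).filter (fun p => p ≠ []))
  let s := if s = [] then ['a'] else s
  let s := PySem.List.slice s none (some 15)
  let s := if PySem.Chars.endswith s ['.'] then PySem.List.slice s none (some (-1)) else s
  -- s + s[-1] * (3 - len(s)); the .getD default is where Python's s[-1] would raise (unreachable: s is nonempty)
  let s := if s.length < 3 then s ++ List.replicate (3 - s.length) ((PySem.List.pyGet? s (-1)).getD ' ') else s
  String.ofList s

-- ===== PRECONDITION & SPEC =====
def Spec_solution (new_id : String) (out : String) : Prop := out = solution_alt new_id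
instance (new_id : String) (out : String) : Decidable (Spec_solution new_id out) := by unfold Spec_solution; infer_instance

-- ===== CLAIM (what is proved, stated in full; the proofs are below) =====
def Claim_equal_solution : Prop := ∀ (new_id : String), Dom_solution new_id → Spec_solution new_id (solution new_id)

-- ===== LEMMAS AND PROOFS =====


-- ---- proof-side recursive split, matching Python's str.split('.') ----
def splitDot : List Char → List (List Char)
  | [] => [[]]
  | c :: xs => if c = '.' then [] :: splitDot xs else
      match splitDot xs with
      | p :: ps => (c :: p) :: ps
      | [] => [[c]]

lemma splitDot_ne_nil : ∀ l : List Char, splitDot l ≠ []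
  | [] => by simp [splitDot]
  | c :: xs => by unfold splitDot; split; · simp
                  · split <;> simp

def consHead (x : List Char) : List (List Char) → List (List Char)
  | [] => [x]
  | p :: ps => (x ++ p) :: ps

lemma go_eq (fuel : Nat) : ∀ (l cur : List Char) (acc : List (List Char)), l.length < fuel →
    PySem.Chars.splitOn.go ['.'] fuel l cur acc = acc.reverse ++ consHead cur.reverse (splitDot l) := by
  induction fuel with
  | zero => intro l cur acc h; omega
  | succ f ih =>
    intro l cur acc h
    cases l with
    | nil => simp [PySem.Chars.splitOn.go, splitDot, consHead]
    | cons c rest =>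
      rw [PySem.Chars.splitOn.go]
      by_cases hc : c = '.'
      · subst hc
        have hp : List.isPrefixOf ['.'] ('.' :: rest) = true := by simp [List.isPrefixOf]
        simp only [hp, if_true]
        rw [ih _ _ _ (by simpa using Nat.lt_of_succ_lt_succ h)]
        cases hs : splitDot rest with
        | nil => exact absurd hs (splitDot_ne_nil rest)
        | cons p ps => simp [splitDot, hs, consHead]
      · have hp : List.isPrefixOf ['.'] (c :: rest) = false := by
          simp [List.isPrefixOf]; exact fun h => hc h.symm
        simp only [hp, Bool.false_eq_true, if_false]
        rw [ih _ _ _ (by simpa using Nat.lt_of_succ_lt_succ h)]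
        cases hs : splitDot rest with
        | nil => exact absurd hs (splitDot_ne_nil rest)
        | cons p ps => simp [splitDot, hs, consHead, hc]

lemma splitOn_eq (l : List Char) : PySem.Chars.splitOn l ['.'] = splitDot l := by
  show PySem.Chars.splitOn.go ['.'] (l.length + 1) l [] [] = splitDot l
  rw [go_eq _ _ _ _ (by omega)]
  cases hs : splitDot l with
  | nil => exact absurd hs (splitDot_ne_nil l)
  | cons p ps => simp [consHead]

-- ---- join over '.' ----
def jd : List (List Char) → List Char
  | [] => []
  | [p] => p
  | p :: q :: ps => p ++ '.' :: jd (q :: ps)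

lemma jd_eq_intercalate : ∀ L : List (List Char), jd L = List.intercalate ['.'] L
  | [] => by simp [jd, List.intercalate]
  | [p] => by simp [jd, List.intercalate]
  | p :: q :: ps => by
      rw [jd, jd_eq_intercalate (q :: ps)]
      simp [List.intercalate, List.intersperse]

lemma jd_cons (p : List Char) (L : List (List Char)) :
    jd (p :: L) = p ++ (if L = [] then [] else '.' :: jd L) := by
  cases L <;> simp [jd]

lemma jd_ne_nil (p : List Char) (L : List (List Char)) (hp : p ≠ []) : jd (p :: L) ≠ [] := by
  rw [jd_cons]; cases L <;> simp [hp]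

-- jp l: '.'-join of the nonempty parts of splitDot l
def jp (l : List Char) : List Char := jd ((splitDot l).filter (fun p => p ≠ []))

lemma jp_nil : jp [] = [] := by simp [jp, splitDot, jd]

lemma jp_dot (xs : List Char) : jp ('.' :: xs) = jp xs := by
  simp [jp, splitDot]

lemma splitDot_cons_of_ne (c : Char) (xs : List Char) (hc : c ≠ '.') (p : List Char)
    (ps : List (List Char)) (hs : splitDot xs = p :: ps) :
    splitDot (c :: xs) = (c :: p) :: ps := by
  unfold splitDot; simp [hc, hs]

lemma jp_singleton (c : Char) (hc : c ≠ '.') : jp [c] = [c] := by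
  simp [jp, splitDot, hc, jd]

lemma jp_cons_dot (c : Char) (ys : List Char) (hc : c ≠ '.') :
    jp (c :: '.' :: ys) = c :: (if jp ys = [] then [] else '.' :: jp ys) := by
  obtain ⟨p, ps, hs⟩ : ∃ p ps, splitDot ys = p :: ps := by
    cases h : splitDot ys with
    | nil => exact absurd h (splitDot_ne_nil ys)
    | cons p ps => exact ⟨p, ps, rfl⟩
  have h2 : splitDot (c :: '.' :: ys) = [c] :: p :: ps :=
    splitDot_cons_of_ne c ('.' :: ys) hc [] (p :: ps) (by simp [splitDot, hs])
  have hkeep : ([c] :: p :: ps).filter (fun q => q ≠ []) = [c] :: (p :: ps).filter (fun q => q ≠ []) := by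
    simp [List.filter_cons]
  have hjpys : jp ys = jd ((p :: ps).filter (fun q => q ≠ [])) := by rw [jp, hs]
  rw [jp, h2, hkeep, jd_cons]
  simp only [ne_eq, decide_not] at hjpys ⊢
  by_cases hnil : List.filter (fun q => !decide (q = [])) (p :: ps) = []
  · have hys : jp ys = [] := by rw [hjpys, hnil]; rfl
    rw [if_pos hnil, hys, if_pos rfl]; rfl
  · have hne : jp ys ≠ [] := by
      rw [hjpys]
      cases hf : List.filter (fun q => !decide (q = [])) (p :: ps) with
      | nil => exact absurd hf hnil
      | cons a L =>
        have ha : a ≠ [] := by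
          have := List.of_mem_filter (a := a) (by rw [hf]; exact List.mem_cons_self)
          simpa using this
        exact jd_ne_nil a L ha
    rw [if_neg hnil, if_neg hne, hjpys]; rfl

lemma jp_cons_cons (c d : Char) (ys : List Char) (hc : c ≠ '.') (hd : d ≠ '.') :
    jp (c :: d :: ys) = c :: jp (d :: ys) := by
  obtain ⟨p, ps, hs⟩ : ∃ p ps, splitDot ys = p :: ps := by
    cases h : splitDot ys with
    | nil => exact absurd h (splitDot_ne_nil ys)
    | cons p ps => exact ⟨p, ps, rfl⟩
  have h1 : splitDot (d :: ys) = (d :: p) :: ps := splitDot_cons_of_ne d ys hd p ps hs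
  have h2 : splitDot (c :: d :: ys) = (c :: d :: p) :: ps := splitDot_cons_of_ne c (d :: ys) hc _ _ h1
  rw [jp, jp, h1, h2, List.filter_cons, List.filter_cons]
  simp only [ne_eq, decide_not]
  simp [jd_cons]

lemma jp_ne_nil (c : Char) (xs : List Char) (hc : c ≠ '.') : jp (c :: xs) ≠ [] := by
  obtain ⟨p, ps, hs⟩ : ∃ p ps, splitDot xs = p :: ps := by
    cases h : splitDot xs with
    | nil => exact absurd h (splitDot_ne_nil xs)
    | cons p ps => exact ⟨p, ps, rfl⟩
  rw [jp, splitDot_cons_of_ne c xs hc p ps hs, List.filter_cons]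
  simp only [ne_eq, decide_not]
  simp
  exact jd_ne_nil _ _ (by simp)

lemma jp_eq_nil_all_dots : ∀ l : List Char, jp l = [] → ∀ x ∈ l, x = '.' := by
  intro l
  induction l with
  | nil => simp
  | cons c xs ih =>
    intro hnil x hx
    by_cases hc : c = '.'
    · subst hc
      rw [jp_dot] at hnil
      rcases List.mem_cons.1 hx with h | h
      · exact h
      · exact ih hnil x h
    · exact absurd hnil (jp_ne_nil c xs hc)


-- ---- A's loop, flag-indexed, over the filtered character list ----
def stepC (st : List Char × Bool) (c : Char) : List Char × Bool :=
  if c = '.' ∧ st.2 = false then (st.1 ++ [c], true)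
  else if c = '.' ∧ st.2 = true then st
  else (st.1 ++ [c], false)

def cf : Bool → List Char → List Char
  | _, [] => []
  | f, c :: xs => if c = '.' then (if f then cf true xs else '.' :: cf true xs) else c :: cf false xs

def dotL (l : List Char) : List Char := if l.head? = some '.' then ['.'] else []
def dotT (l : List Char) : List Char := if jp l ≠ [] ∧ l.getLast? = some '.' then ['.'] else []

lemma foldl_stepA_filter : ∀ (l : List Char) (st : List Char × Bool),
    l.foldl stepA st = (l.filter (fun c => decide ([c] ∈ canUseList))).foldl stepC st := by
  intro l
  induction l with
  | nil => intro st; rfl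
  | cons c xs ih =>
    intro st
    by_cases hc : [c] ∈ canUseList
    · rw [List.foldl_cons, List.filter_cons_of_pos (by simpa using hc), List.foldl_cons, ← ih]
      congr 1
      simp [stepA, stepC, hc]
    · rw [List.foldl_cons, List.filter_cons_of_neg (by simpa using hc), ← ih]
      congr 1
      simp [stepA, hc]

lemma foldl_stepC_eq : ∀ (l acc : List Char) (flag : Bool),
    (l.foldl stepC (acc, flag)).1 = acc ++ cf flag l := by
  intro l
  induction l with
  | nil => intro acc flag; simp [cf]
  | cons c xs ih =>
    intro acc flag
    by_cases hc : c = '.'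
    · subst hc
      cases flag with
      | false =>
        rw [List.foldl_cons, show stepC (acc, false) '.' = (acc ++ ['.'], true) by simp [stepC], ih]
        simp [cf]
      | true =>
        rw [List.foldl_cons, show stepC (acc, true) '.' = (acc, true) by simp [stepC], ih]
        simp [cf]
    · rw [List.foldl_cons, show stepC (acc, flag) c = (acc ++ [c], false) by simp [stepC, hc], ih]
      simp [cf, hc]

lemma getLast?_all_dots (l : List Char) (h : ∀ x ∈ l, x = '.') (hne : l ≠ []) :
    l.getLast? = some '.' := by
  obtain ⟨a, ha⟩ := List.getLast?_isSome.2 hne |> Option.isSome_iff_exists.1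
  rw [ha]
  exact congrArg some (h a (List.mem_of_getLast? ha)) ▸ rfl

-- the central decomposition: A's loop output is [.] ++ jp ++ [.]
lemma cf_decomp : ∀ l : List Char,
    cf true l = jp l ++ dotT l ∧ cf false l = dotL l ++ (jp l ++ dotT l) := by
  intro l
  induction l with
  | nil => simp [cf, jp_nil, dotL, dotT]
  | cons c xs ih =>
    by_cases hc : c = '.'
    · subst hc
      have e1 : cf true ('.' :: xs) = cf true xs := by simp [cf]
      have e2 : cf false ('.' :: xs) = '.' :: cf true xs := by simp [cf]
      have ejp := jp_dot xs
      cases xs with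
      | nil =>
        simp [cf, jp_dot, jp_nil, dotL, dotT]
      | cons b t =>
        have elast : ('.' :: b :: t).getLast? = (b :: t).getLast? := List.getLast?_cons_cons
        have edotT : dotT ('.' :: b :: t) = dotT (b :: t) := by
          simp only [dotT, ejp, elast]
        rw [e1, e2, ejp, edotT, ih.1]
        refine ⟨rfl, ?_⟩
        simp [dotL]
    · have e1 : cf true (c :: xs) = c :: cf false xs := by simp [cf, hc]
      have e2 : cf false (c :: xs) = c :: cf false xs := by simp [cf, hc]
      have hdotL : dotL (c :: xs) = [] := by simp [dotL, hc]
      have hne := jp_ne_nil c xs hc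
      rw [e1, e2, hdotL, List.nil_append, ih.2]
      cases xs with
      | nil =>
        constructor <;>
          simp [dotL, dotT, jp_nil, jp_singleton c hc, hc]
      | cons d ys =>
        have elast : (c :: d :: ys).getLast? = (d :: ys).getLast? := List.getLast?_cons_cons
        by_cases hd : d = '.'
        · subst hd
          have hjpx : jp ('.' :: ys) = jp ys := jp_dot ys
          have hdot : dotL ('.' :: ys) = ['.'] := by simp [dotL]
          rw [jp_cons_dot c ys hc, hjpx, hdot]
          by_cases hys : jp ys = []
          · have hall : ∀ x ∈ ys, x = '.' := jp_eq_nil_all_dots ys hys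
            have hlast : ('.' :: ys).getLast? = some '.' := by
              cases ys with
              | nil => rfl
              | cons a t =>
                rw [List.getLast?_cons_cons]
                exact getLast?_all_dots _ (fun x hx => hall x hx) (by simp)
            have hdT : dotT ('.' :: ys) = [] := by simp [dotT, hjpx, hys]
            have hdT2 : dotT (c :: '.' :: ys) = ['.'] := by
              simp [dotT, jp_cons_dot c ys hc, hys, elast, hlast]
            rw [hys, hdT, hdT2, if_pos rfl]
            exact ⟨rfl, rfl⟩
          · have hdT : dotT (c :: '.' :: ys) = dotT ('.' :: ys) := by
              simp only [dotT, jp_cons_dot c ys hc, hjpx, elast]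
              simp [hys]
            rw [if_neg hys, hdT]
            exact ⟨by simp, by simp⟩
        · have hjpcc := jp_cons_cons c d ys hc hd
          have hdT : dotT (c :: d :: ys) = dotT (d :: ys) := by
            simp only [dotT, hjpcc, elast]
            simp [jp_ne_nil d ys hd]
          have hdot : dotL (d :: ys) = [] := by simp [dotL, hd]
          rw [hjpcc, hdT, hdot, List.nil_append]
          exact ⟨rfl, rfl⟩


-- ---- parts of splitDot are dot-free ----
lemma splitDot_no_dot : ∀ l : List Char, ∀ p ∈ splitDot l, '.' ∉ p := by
  intro l
  induction l with
  | nil => intro p hp; simp [splitDot] at hp; simp [hp]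
  | cons c xs ih =>
    intro p hp
    by_cases hc : c = '.'
    · subst hc
      have hsd : splitDot ('.' :: xs) = [] :: splitDot xs := by simp [splitDot]
      rw [hsd] at hp
      rcases List.mem_cons.1 hp with h | h
      · simp [h]
      · exact ih p h
    · obtain ⟨q, qs, hs⟩ : ∃ q qs, splitDot xs = q :: qs := by
        cases h : splitDot xs with
        | nil => exact absurd h (splitDot_ne_nil xs)
        | cons q qs => exact ⟨q, qs, rfl⟩
      rw [splitDot_cons_of_ne c xs hc q qs hs] at hp
      rcases List.mem_cons.1 hp with h | h
      · subst h
        intro hmem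
        rcases List.mem_cons.1 hmem with h | h
        · exact hc h.symm
        · exact ih q (by rw [hs]; exact List.mem_cons_self) h
      · exact ih p (by rw [hs]; exact List.mem_cons.2 (Or.inr h))

lemma jd_head : ∀ L : List (List Char), (∀ p ∈ L, p ≠ []) → (∀ p ∈ L, '.' ∉ p) →
    (jd L).head? ≠ some '.' := by
  intro L
  match L with
  | [] => intro _ _; simp [jd]
  | [p] =>
    intro h1 h2
    cases p with
    | nil => exact absurd rfl (h1 [] (by simp))
    | cons a t =>
      simp only [jd, List.head?_cons]
      intro h
      exact h2 (a :: t) (by simp) (by rw [Option.some_inj.1 h]; exact List.mem_cons_self)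
  | p :: q :: ps =>
    intro h1 h2
    cases p with
    | nil => exact absurd rfl (h1 [] (by simp))
    | cons a t =>
      simp only [jd, List.cons_append, List.head?_cons]
      intro h
      exact h2 (a :: t) (by simp) (by rw [Option.some_inj.1 h]; exact List.mem_cons_self)

lemma jd_last : ∀ L : List (List Char), (∀ p ∈ L, p ≠ []) → (∀ p ∈ L, '.' ∉ p) →
    (jd L).getLast? ≠ some '.' := by
  intro L
  match L with
  | [] => intro _ _; simp [jd]
  | [p] =>
    intro h1 h2
    simp only [jd]
    intro h
    exact h2 p (by simp) (List.mem_of_getLast? h)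
  | p :: q :: ps =>
    intro h1 h2
    have ihl := jd_last (q :: ps) (fun r hr => h1 r (List.mem_cons.2 (Or.inr hr)))
      (fun r hr => h2 r (List.mem_cons.2 (Or.inr hr)))
    have hqne : jd (q :: ps) ≠ [] := jd_ne_nil q ps (h1 q (by simp))
    simp only [jd]
    rw [List.getLast?_append]
    cases hj : jd (q :: ps) with
    | nil => exact absurd hj hqne
    | cons b r =>
      rw [List.getLast?_cons_cons]
      rw [hj] at ihl
      cases hbl : (b :: r).getLast? with
      | none => simp at hbl
      | some x =>
        rw [hbl] at ihl
        simpa [hbl] using ihl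

lemma jp_head (l : List Char) : (jp l).head? ≠ some '.' := by
  apply jd_head
  · intro p hp; simpa using (List.of_mem_filter hp)
  · intro p hp; exact splitDot_no_dot l p (List.mem_of_mem_filter hp)

lemma jp_last (l : List Char) : (jp l).getLast? ≠ some '.' := by
  apply jd_last
  · intro p hp; simpa using (List.of_mem_filter hp)
  · intro p hp; exact splitDot_no_dot l p (List.mem_of_mem_filter hp)

-- ---- the two character-set tests agree ----
lemma mem_canUse (c : Char) : ([c] ∈ canUseList) ↔ c ∈ allowedB := by
  have h1 : canUseList = "abcdefghijklmnopqrstuvwxyz-_.0123456789".toList.map (fun c => [c]) := by decide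
  have h2 : "abcdefghijklmnopqrstuvwxyz-_.0123456789".toList.Perm allowedB := by decide
  rw [h1, ← h2.mem_iff]
  simp

-- ---- the pad loop in closed form ----
lemma padA_eq_aux : ∀ (n : Nat) (t : List Char) (h : t ≠ []), 3 - t.length ≤ n →
    padA t = t ++ List.replicate (3 - t.length) (t.getLast h) := by
  intro n
  induction n with
  | zero =>
    intro t h hn
    rw [padA, dif_neg (by omega)]
    have : 3 - t.length = 0 := by omega
    simp [this]
  | succ n ih =>
    intro t h hn
    by_cases h3 : t.length ≤ 2
    · have hget : PySem.List.pyGet? t (-1) = some (t.getLast h) := by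
        rw [PySem.List.pyGet?_neg_one, List.getLast?_eq_some_getLast]
      rw [padA, dif_pos h3, hget]
      show padA (t ++ [t.getLast h]) = _
      rw [ih (t ++ [t.getLast h]) (by simp) (by simp; omega)]
      rw [List.getLast_concat]
      have harith : 3 - t.length = (3 - (t ++ [t.getLast h]).length) + 1 := by simp; omega
      rw [harith, List.append_assoc]
      simp [List.replicate_succ]
    · rw [padA, dif_neg h3]
      have : 3 - t.length = 0 := by omega
      simp [this]

lemma padA_eq (t : List Char) (h : t ≠ []) :
    padA t = t ++ List.replicate (3 - t.length) (t.getLast h) :=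
  padA_eq_aux (3 - t.length) t h le_rfl

-- ---- endswith('.') is a getLast? test ----
lemma endswith_dot_iff (s : List Char) : PySem.Chars.endswith s ['.'] = true ↔ s.getLast? = some '.' := by
  show List.isSuffixOf ['.'] s = true ↔ _
  rw [List.isSuffixOf_iff_suffix]
  constructor
  · rintro ⟨t, rfl⟩
    simp
  · intro h
    rcases List.eq_nil_or_concat s with rfl | ⟨q, a, rfl⟩
    · simp at h
    · rw [List.concat_eq_append] at h ⊢
      rw [List.getLast?_append] at h
      simp at h
      exact ⟨q, by rw [h]⟩


lemma head?_append_left {l r : List Char} (h : l ≠ []) : (l ++ r).head? = l.head? := by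
  cases l with
  | nil => exact absurd rfl h
  | cons a t => simp

lemma getLast?_replicate_succ (k : Nat) (c : Char) :
    (List.replicate (k + 1) c).getLast? = some c := by
  rw [List.replicate_succ', List.getLast?_append]
  simp

-- the first conditional strip of A, applied to dotL ++ (jp ++ dotT)
lemma stripHead_eq (lf : List Char) :
    (if dotL lf ++ (jp lf ++ dotT lf) ≠ [] then
      (if PySem.List.pyGet? (dotL lf ++ (jp lf ++ dotT lf)) 0 = some '.' ∧ dotL lf ++ (jp lf ++ dotT lf) ≠ [] then
        PySem.List.slice (dotL lf ++ (jp lf ++ dotT lf)) (some 1) none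
      else dotL lf ++ (jp lf ++ dotT lf))
    else dotL lf ++ (jp lf ++ dotT lf)) = jp lf ++ dotT lf := by
  by_cases hD : dotL lf = ['.']
  · rw [hD]
    simp only [List.cons_append, List.nil_append]
    rw [if_pos (by simp), if_pos ⟨PySem.List.pyGet?_zero_cons '.' _, by simp⟩, PySem.List.slice_from_one]
    rfl
  · have hD0 : dotL lf = [] := by
      unfold dotL at hD ⊢
      by_cases hh : lf.head? = some '.'
      · simp [hh] at hD
      · simp [hh]
    rw [hD0, List.nil_append]
    by_cases hnil : jp lf ++ dotT lf = []
    · simp [hnil]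
    · rw [if_pos hnil]
      have hjpne : jp lf ≠ [] := by
        intro hj
        apply hnil
        have hdt : dotT lf = [] := by simp [dotT, hj]
        rw [hj, hdt]
        rfl
      have hhead : (jp lf ++ dotT lf).head? = (jp lf).head? := head?_append_left hjpne
      rw [if_neg]
      intro ⟨hc, _⟩
      rw [PySem.List.pyGet?_zero, ← List.head?_eq_getElem?] at hc
      exact jp_head lf (hhead ▸ hc)

-- the second conditional strip of A, applied to jp ++ dotT
lemma stripTail_eq (lf : List Char) :
    (if jp lf ++ dotT lf ≠ [] then
      (if PySem.List.pyGet? (jp lf ++ dotT lf) (-1) = some '.' then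
        PySem.List.slice (jp lf ++ dotT lf) none (some (-1))
      else jp lf ++ dotT lf)
    else jp lf ++ dotT lf) = jp lf := by
  by_cases hD : dotT lf = ['.']
  · rw [hD]
    rw [if_pos (by simp)]
    rw [PySem.List.pyGet?_neg_one_append_singleton]
    rw [if_pos rfl, PySem.List.slice_to_neg_one, List.dropLast_concat]
  · have hD0 : dotT lf = [] := by
      unfold dotT at hD ⊢
      by_cases hh : jp lf ≠ [] ∧ lf.getLast? = some '.'
      · simp [hh] at hD
      · simp [hh]
    rw [hD0, List.append_nil]
    by_cases hnil : jp lf = []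
    · simp [hnil]
    · rw [if_pos hnil, if_neg]
      rw [PySem.List.pyGet?_neg_one]
      exact jp_last lf

lemma headstrip_noop (t : List Char) (h : t.head? ≠ some '.') :
    (if t ≠ [] then (if PySem.List.pyGet? t 0 = some '.' ∧ t ≠ [] then PySem.List.slice t (some 1) none else t) else t) = t := by
  by_cases hne : t ≠ []
  · rw [if_pos hne, if_neg]
    intro ⟨hc, _⟩
    rw [PySem.List.pyGet?_zero, ← List.head?_eq_getElem?] at hc
    exact h hc
  · rw [if_neg hne]

lemma tailstrip_noop (t : List Char) (h : t.getLast? ≠ some '.') :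
    (if t ≠ [] then (if PySem.List.pyGet? t (-1) = some '.' then PySem.List.slice t none (some (-1)) else t) else t) = t := by
  by_cases hne : t ≠ []
  · rw [if_pos hne, if_neg]
    rw [PySem.List.pyGet?_neg_one]
    exact h
  · rw [if_neg hne]

-- the common tail of both pipelines, starting from the joined core s0
lemma final_tail (s0 : List Char) (hh : s0.head? ≠ some '.') (hl : s0.getLast? ≠ some '.') :
    (let t3 := if s0.length = 0 then ['a'] else s0
     let t4 := PySem.List.slice t3 none (some 15)
     let t5 := padA t4
     let t6 := if t5 ≠ [] then (if PySem.List.pyGet? t5 0 = some '.' ∧ t5 ≠ [] then PySem.List.slice t5 (some 1) none else t5) else t5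
     if t6 ≠ [] then (if PySem.List.pyGet? t6 (-1) = some '.' then PySem.List.slice t6 none (some (-1)) else t6) else t6)
  = (let s1 := if s0 = [] then ['a'] else s0
     let s2 := PySem.List.slice s1 none (some 15)
     let s3 := if PySem.Chars.endswith s2 ['.'] then PySem.List.slice s2 none (some (-1)) else s2
     if s3.length < 3 then s3 ++ List.replicate (3 - s3.length) ((PySem.List.pyGet? s3 (-1)).getD ' ') else s3) := by
  have e1 : (if s0.length = 0 then ['a'] else s0) = (if s0 = [] then ['a'] else s0) := by
    by_cases h : s0 = [] <;> simp [h]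
  simp only [e1]
  set t1 : List Char := if s0 = [] then ['a'] else s0 with ht1def
  have ht1ne : t1 ≠ [] := by by_cases h : s0 = [] <;> simp [ht1def, h]
  have hh1 : t1.head? ≠ some '.' := by
    by_cases h : s0 = []
    · simp [ht1def, h]
    · simpa [ht1def, h] using hh
  have hl1 : t1.getLast? ≠ some '.' := by
    by_cases h : s0 = []
    · simp [ht1def, h]
    · simpa [ht1def, h] using hl
  have hslice : PySem.List.slice t1 none (some 15) = t1.take 15 := by
    rw [PySem.List.slice_to t1 (b := 15) (by norm_num)]
    rfl
  simp only [hslice]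
  by_cases hle : t1.length ≤ 15
  · rw [List.take_of_length_le hle]
    have hcl : t1.getLast? = some (t1.getLast ht1ne) := List.getLast?_eq_some_getLast ht1ne
    set c := t1.getLast ht1ne with hcdef
    have hcne : c ≠ '.' := fun h => hl1 (by rw [hcl, h])
    rw [padA_eq t1 ht1ne, ← hcdef]
    have hpadne : t1 ++ List.replicate (3 - t1.length) c ≠ [] := by
      intro h
      exact ht1ne (List.append_eq_nil_iff.1 h).1
    have hheadpad : (t1 ++ List.replicate (3 - t1.length) c).head? = t1.head? :=
      head?_append_left ht1ne
    have hlastpad : (t1 ++ List.replicate (3 - t1.length) c).getLast? = some c := by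
      cases hk : 3 - t1.length with
      | zero => simpa [hk] using hcl
      | succ k =>
        rw [List.getLast?_append, getLast?_replicate_succ]
        rfl
    rw [headstrip_noop _ (by rw [hheadpad]; exact hh1)]
    rw [tailstrip_noop _ (by rw [hlastpad]; exact fun h => hcne (Option.some_inj.1 h))]
    rw [if_neg (fun h => hl1 ((endswith_dot_iff t1).1 h))]
    have hget : (PySem.List.pyGet? t1 (-1)).getD ' ' = c := by
      rw [PySem.List.pyGet?_neg_one, hcl]
      rfl
    rw [hget]
    by_cases h3 : t1.length < 3
    · rw [if_pos h3]
    · rw [if_neg h3]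
      have h0 : 3 - t1.length = 0 := by omega
      rw [h0]
      simp
  · push_neg at hle
    set t2 : List Char := t1.take 15 with ht2def
    have ht2len : t2.length = 15 := by
      rw [ht2def, List.length_take]
      omega
    have ht2ne : t2 ≠ [] := by
      intro h
      rw [h] at ht2len
      simp at ht2len
    have hpad : padA t2 = t2 := by
      rw [padA_eq t2 ht2ne, show 3 - t2.length = 0 by omega]
      simp
    rw [hpad]
    have hhead2 : t2.head? = t1.head? := by
      cases ht : t1 with
      | nil => exact absurd ht ht1ne
      | cons a t => rw [ht2def, ht, List.take_succ_cons, List.head?_cons, List.head?_cons]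
    rw [headstrip_noop t2 (by rw [hhead2]; exact hh1)]
    by_cases hdot : t2.getLast? = some '.'
    · rw [if_pos ht2ne]
      rw [PySem.List.pyGet?_neg_one, if_pos hdot]
      rw [if_pos ((endswith_dot_iff t2).2 hdot)]
      rw [PySem.List.slice_to_neg_one]
      rw [if_neg (by rw [List.length_dropLast, ht2len]; omega)]
    · rw [if_pos ht2ne]
      rw [PySem.List.pyGet?_neg_one, if_neg hdot]
      rw [if_neg (fun h => hdot ((endswith_dot_iff t2).1 h))]
      rw [if_neg (by rw [ht2len]; omega)]

lemma join_eq_jd (L : List (List Char)) : PySem.Chars.join ['.'] L = jd L :=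
  (jd_eq_intercalate L).symm

-- ===== VERDICT (by name: the statement is the Claim_ definition above) =====
theorem solution_spec : Claim_equal_solution := by
  intro new_id _
  show solution new_id = solution_alt new_id
  unfold solution solution_alt
  simp only [PySem.Str.toList_lower]
  rw [foldl_stepA_filter]
  rw [List.filter_congr (l := PySem.Chars.lower new_id.toList)
    (q := fun c => decide (c ∈ allowedB)) (fun c _ => by simp [mem_canUse])]
  rw [foldl_stepC_eq _ [] false, List.nil_append]
  set lf := (PySem.Chars.lower new_id.toList).filter (fun c => decide (c ∈ allowedB)) with hlf
  rw [(cf_decomp lf).2]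
  rw [stripHead_eq lf, stripTail_eq lf]
  rw [splitOn_eq, join_eq_jd]
  have hjp : jd ((splitDot lf).filter (fun p => p ≠ [])) = jp lf := rfl
  rw [hjp]
  exact congrArg String.ofList (final_tail (jp lf) (jp_head lf) (jp_last lf))
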